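-- pv_equiv track=rewrite | github.com/GundalaNikhil/DSA | generate_bitwise_all_correct.py | bit016_solution
-- ===== SOURCE A (Python) =====
-- def bit016_solution(a: list, K: int) -> int:
--     """BIT-016: Max OR Subarray <= K"""
--     max_len = 0
--     for i in range(len(a)):
--         or_val = 0
--         for j in range(i, len(a)):
--             or_val |= a[j]
--             if or_val <= K:
--                 max_len = max(max_len, j - i + 1)
--             else:
--                 break
--     return max_len
-- ===== SOURCE B (Python) =====
-- def bit016_solution(a: list, K: int) -> int:
--     """BIT-016: Max OR Subarray <= K — single pass, incrementally maintaining the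
--     surviving window starts with their running ORs instead of rescanning from each start."""
--     best = 0
--     alive = []  # (start, OR of a[start..current]) for starts whose every prefix OR stayed <= K
--     for j, x in enumerate(a):
--         alive = [(s, v | x) for (s, v) in alive] + [(j, x)]
--         alive = [(s, v) for (s, v) in alive if v <= K]
--         if alive:
--             best = max(best, j - alive[0][0] + 1)
--     return best
-- ===== Notes on version B (the rewrite author's own statement) =====
-- stated objective: alternative
-- what changed: A restarts an OR-accumulating scan from every start index (nested loops with break); B makes a single left-to-right pass that incrementally maintains the list of still-alive window starts with their running ORs, dropping a start permanently once its OR exceeds K.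
import Mathlib
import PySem

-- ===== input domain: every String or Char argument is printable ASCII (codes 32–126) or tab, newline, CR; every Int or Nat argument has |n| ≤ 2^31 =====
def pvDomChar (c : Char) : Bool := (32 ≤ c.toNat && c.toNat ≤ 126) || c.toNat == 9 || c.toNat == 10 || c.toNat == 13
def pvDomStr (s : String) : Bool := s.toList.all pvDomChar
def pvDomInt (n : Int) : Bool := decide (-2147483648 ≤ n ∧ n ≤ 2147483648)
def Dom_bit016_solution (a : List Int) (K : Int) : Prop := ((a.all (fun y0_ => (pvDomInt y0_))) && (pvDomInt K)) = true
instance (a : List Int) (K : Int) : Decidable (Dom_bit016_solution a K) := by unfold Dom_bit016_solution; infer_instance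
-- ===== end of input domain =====

-- B replaces A's restart-from-every-start nested scan by a single left-to-right pass that
-- incrementally maintains the still-alive window starts with their running ORs (alternative
-- decomposition, same worst-case cost).

-- ===== PORT A =====
-- inner loop: for j in range(i, len(a)): or_val |= a[j]; if or_val <= K: max_len = max(...) else: break
def pvInnerA (a : List Int) (K : Int) (i : Nat) (j : Nat) (orv maxl : Int) : Int :=
  if h : j < a.length then
    let orv' := PySem.Int.bor orv a[j]
    if orv' ≤ K then pvInnerA a K i (j + 1) orv' (max maxl ((j : Int) - (i : Int) + 1))
    else maxl
  else maxl
termination_by a.length - j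

def bit016_solution (a : List Int) (K : Int) : Int :=
  (List.range a.length).foldl (fun maxl i => pvInnerA a K i i 0 maxl) 0

-- ===== PORT B =====
-- one iteration of B's loop body: update running ORs, add start j, drop dead starts, update best
def pvStepB (K : Int) (st : Int × List (Int × Int)) (jx : Int × Int) : Int × List (Int × Int) :=
  let alive := ((st.2.map (fun p => (p.1, PySem.Int.bor p.2 jx.2))) ++ [(jx.1, jx.2)]).filter
      (fun p => p.2 ≤ K)
  match alive with
  | [] => (st.1, alive)
  | (s, _) :: _ => (max st.1 (jx.1 - s + 1), alive)

def bit016_solution_alt (a : List Int) (K : Int) : Int :=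
  ((PySem.List.enumerate a 0).foldl (pvStepB K) (0, [])).1

-- ===== PRECONDITION & SPEC =====
def Spec_bit016_solution (a : List Int) (K : Int) (out : Int) : Prop := out = bit016_solution_alt a K
instance (a : List Int) (K : Int) (out : Int) : Decidable (Spec_bit016_solution a K out) := by unfold Spec_bit016_solution; infer_instance

-- ===== CLAIM (what is proved, stated in full; the proofs are below) =====
def Claim_equal_bit016_solution : Prop := ∀ (a : List Int) (K : Int), Dom_bit016_solution a K → Spec_bit016_solution a K (bit016_solution a K)

-- ===== LEMMAS AND PROOFS =====

-- OR of a list, and OR of the segment a[i..j-1]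
def pvOrL (l : List Int) : Int := l.foldl PySem.Int.bor 0
def pvPo (a : List Int) (i j : Nat) : Int := pvOrL ((a.drop i).take (j - i))
-- "start i is alive through index j": every prefix OR a[i..t] (i ≤ t ≤ j) is ≤ K
def pvOkb (a : List Int) (K : Int) (i j : Nat) : Bool :=
  (List.range' i (j + 1 - i)).all (fun t => decide (pvPo a i (t + 1) ≤ K))
-- length contributed by the pair (start, end) = (p.1, p.2), 0 if not alive
def pvG (a : List Int) (K : Int) (p : Nat × Nat) : Nat :=
  if p.1 ≤ p.2 ∧ pvOkb a K p.1 p.2 = true then p.2 - p.1 + 1 else 0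
-- the common value: max alive window length
def pvT (a : List Int) (K : Int) : Nat :=
  ((Finset.range a.length) ×ˢ (Finset.range a.length)).sup (pvG a K)
def pvCol (a : List Int) (K : Int) (j : Nat) : Nat :=
  (Finset.range a.length).sup (fun i => pvG a K (i, j))
-- B's alive list after processing the first j elements
def pvAliveL (a : List Int) (K : Int) (j : Nat) : List (Int × Int) :=
  ((List.range j).filter (fun i => pvOkb a K i (j - 1))).map (fun i => ((i : Int), pvPo a i j) : Nat → Int × Int)

theorem pvOkb_iff (a : List Int) (K : Int) (i j : Nat) :
    pvOkb a K i j = true ↔ ∀ t, i ≤ t → t ≤ j → pvPo a i (t + 1) ≤ K := by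
  unfold pvOkb
  rw [List.all_eq_true]
  constructor
  · intro h t ht1 ht2
    have := h t (by rw [List.mem_range'_1]; omega)
    simpa using this
  · intro h t ht
    rw [List.mem_range'_1] at ht
    simpa using h t (by omega) (by omega)

theorem pvPo_self (a : List Int) (i : Nat) : pvPo a i i = 0 := by
  simp [pvPo, pvOrL]

theorem pvPo_succ (a : List Int) (i j : Nat) (hij : i ≤ j) (hj : j < a.length) :
    pvPo a i (j + 1) = PySem.Int.bor (pvPo a i j) a[j] := by
  unfold pvPo pvOrL
  have h1 : j + 1 - i = (j - i) + 1 := by omega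
  have h2 : (a.drop i)[j - i]? = some a[j] := by
    rw [List.getElem?_drop]
    rw [List.getElem?_eq_getElem (by omega)]
    congr 1
    congr 1
    omega
  rw [h1, List.take_add_one, h2]
  simp [List.foldl_append]

theorem pvInnerA_spec (a : List Int) (K : Int) (i : Nat) :
    ∀ d j orv m, a.length - j ≤ d → i ≤ j → orv = pvPo a i j →
      (∀ t, i ≤ t → t < j → pvPo a i (t + 1) ≤ K) → 0 ≤ m →
      pvInnerA a K i j orv m
        = max m (((Finset.Ico j a.length).sup (fun j' => pvG a K (i, j')) : Nat) : Int) := by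
  intro d
  induction d with
  | zero =>
    intro j orv m hd hij horv hok hm
    rw [pvInnerA, dif_neg (by omega)]
    rw [Finset.Ico_eq_empty (by omega)]
    simp [max_eq_left hm]
  | succ d ih =>
    intro j orv m hd hij horv hok hm
    by_cases hj : j < a.length
    · rw [pvInnerA, dif_pos hj]
      have horv' : PySem.Int.bor orv a[j] = pvPo a i (j + 1) := by
        rw [horv, pvPo_succ a i j hij hj]
      rw [horv']
      by_cases hK : pvPo a i (j + 1) ≤ K
      · rw [if_pos hK]
        have hlen : (0 : Int) ≤ (j : Int) - (i : Int) + 1 := by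
          have : (i : Int) ≤ (j : Int) := by exact_mod_cast hij
          omega
        rw [ih (j + 1) _ _ (by omega) (by omega) rfl
          (by
            intro t ht1 ht2
            rcases Nat.lt_or_ge t j with h | h
            · exact hok t ht1 h
            · have : t = j := by omega
              rw [this]; exact hK)
          (le_max_of_le_right hlen)]
        have hok_j : pvOkb a K i j = true := by
          rw [pvOkb_iff]
          intro t ht1 ht2
          rcases Nat.lt_or_ge t j with h | h
          · exact hok t ht1 h
          · have : t = j := by omega
            rw [this]; exact hK
        have hIco : Finset.Ico j a.length = insert j (Finset.Ico (j + 1) a.length) := by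
          ext x
          simp only [Finset.mem_Ico, Finset.mem_insert]
          omega
        rw [hIco, Finset.sup_insert]
        have hg : pvG a K (i, j) = j - i + 1 := by
          simp [pvG, hij, hok_j]
        rw [max_assoc]
        congr 1
        rw [Nat.cast_max, hg]
        congr 1
        push_cast [Nat.sub_add_cancel]
        omega
      · rw [if_neg hK]
        have hsup : (Finset.Ico j a.length).sup (fun j' => pvG a K (i, j')) = 0 := by
          apply Nat.le_antisymm _ (Nat.zero_le _)
          apply Finset.sup_le
          intro j' hj'
          rw [Finset.mem_Ico] at hj'
          have : pvG a K (i, j') = 0 := by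
            unfold pvG
            rw [if_neg]
            rintro ⟨h1, h2⟩
            rw [pvOkb_iff] at h2
            exact hK (h2 j hij (by omega))
          omega
        rw [hsup]
        simp [max_eq_left hm]
    · rw [pvInnerA, dif_neg hj]
      rw [Finset.Ico_eq_empty (by omega)]
      simp [max_eq_left hm]

theorem pvRow_eq (a : List Int) (K : Int) (i : Nat) :
    (Finset.Ico i a.length).sup (fun j' => pvG a K (i, j'))
      = (Finset.range a.length).sup (fun j' => pvG a K (i, j')) := by
  apply Nat.le_antisymm
  · apply Finset.sup_le
    intro j' hj'
    rw [Finset.mem_Ico] at hj'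
    exact Finset.le_sup (f := fun j' => pvG a K (i, j')) (Finset.mem_range.mpr hj'.2)
  · apply Finset.sup_le
    intro j' hj'
    rw [Finset.mem_range] at hj'
    rcases Nat.lt_or_ge j' i with h | h
    · have : pvG a K (i, j') = 0 := by
        unfold pvG
        rw [if_neg]
        rintro ⟨h1, _⟩
        omega
      omega
    · exact Finset.le_sup (f := fun j' => pvG a K (i, j')) (Finset.mem_Ico.mpr ⟨h, hj'⟩)

theorem pvA_eq_T (a : List Int) (K : Int) : bit016_solution a K = (pvT a K : Int) := by
  have H : ∀ n, n ≤ a.length → ∀ (m : Int), 0 ≤ m →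
      (List.range n).foldl (fun maxl i => pvInnerA a K i i 0 maxl) m
        = max m (((Finset.range n).sup
            (fun i => (Finset.range a.length).sup (fun j' => pvG a K (i, j'))) : Nat) : Int) := by
    intro n
    induction n with
    | zero => intro _ m hm; simp [max_eq_left hm]
    | succ n ih =>
      intro hn m hm
      rw [List.range_succ, List.foldl_append, ih (by omega) m hm]
      simp only [List.foldl_cons, List.foldl_nil]
      rw [pvInnerA_spec a K n (a.length - n) n 0 _ (by omega) (by omega) (pvPo_self a n).symm
        (by intro t ht1 ht2; omega) (le_max_of_le_right (by positivity))]
      rw [pvRow_eq, Finset.range_add_one, Finset.sup_insert, max_assoc, Nat.cast_max]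
      congr 1
      exact max_comm _ _
  unfold bit016_solution pvT
  rw [H a.length (le_refl _) 0 (le_refl _), Finset.sup_product_left]
  simp

theorem pvPo_single (a : List Int) (j : Nat) (hj : j < a.length) : pvPo a j (j + 1) = a[j] := by
  rw [pvPo_succ a j j (le_refl _) hj, pvPo_self, PySem.Int.bor_comm, PySem.Int.bor_zero]

theorem pvOkb_self (a : List Int) (K : Int) (j : Nat) :
    pvOkb a K j j = decide (pvPo a j (j + 1) ≤ K) := by
  by_cases h : pvPo a j (j + 1) ≤ K
  · simp only [h, decide_true]
    rw [pvOkb_iff]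
    intro t ht1 ht2
    have ht : t = j := by omega
    rw [ht]; exact h
  · simp only [h, decide_false]
    exact Bool.eq_false_iff.mpr
      (fun hc => h ((pvOkb_iff a K j j).mp hc j (le_refl _) (le_refl _)))

theorem pvOkb_step (a : List Int) (K : Int) (i j : Nat) (hi : i < j) :
    (pvOkb a K i (j - 1) && decide (pvPo a i (j + 1) ≤ K)) = pvOkb a K i j := by
  by_cases hK : pvPo a i (j + 1) ≤ K
  · simp only [hK, decide_true, Bool.and_true]
    rcases Bool.eq_false_or_eq_true (pvOkb a K i (j - 1)) with hb | hb
    · rw [hb]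
      symm
      rw [pvOkb_iff]
      rw [pvOkb_iff] at hb
      intro t ht1 ht2
      rcases Nat.lt_or_ge t j with h | h
      · exact hb t ht1 (by omega)
      · have ht : t = j := by omega
        rw [ht]; exact hK
    · rw [hb]
      symm
      apply Bool.eq_false_iff.mpr
      intro hc
      apply Bool.eq_false_iff.mp hb
      rw [pvOkb_iff] at hc ⊢
      intro t ht1 ht2
      exact hc t ht1 (by omega)
  · simp only [hK, decide_false, Bool.and_false]
    symm
    exact Bool.eq_false_iff.mpr
      (fun hc => hK ((pvOkb_iff a K i j).mp hc j (by omega) (le_refl _)))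

theorem pvAlive_step (a : List Int) (K : Int) (j : Nat) (hj : j < a.length) :
    (((pvAliveL a K j).map (fun p => (p.1, PySem.Int.bor p.2 a[j])) ++ [((j : Int), a[j])]).filter
        (fun p => p.2 ≤ K))
      = pvAliveL a K (j + 1) := by
  have hF1 : (pvAliveL a K j).map (fun p => (p.1, PySem.Int.bor p.2 a[j]))
      = ((List.range j).filter (fun i => pvOkb a K i (j - 1))).map
          ((fun i => ((i : Int), pvPo a i (j + 1)) : Nat → Int × Int)) := by
    unfold pvAliveL
    rw [List.map_map]
    apply List.map_congr_left
    intro i hi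
    have hij : i < j := List.mem_range.mp (List.mem_of_mem_filter hi)
    simp only [Function.comp]
    rw [pvPo_succ a i j (by omega) hj]
  have hF2 : (((j : Int), a[j]) : Int × Int)
      = ((fun i => ((i : Int), pvPo a i (j + 1)) : Nat → Int × Int)) j := by
    simp [pvPo_single a j hj]
  rw [hF1, hF2]
  have hsing : (((List.range j).filter (fun i => pvOkb a K i (j - 1))).map
        ((fun i => ((i : Int), pvPo a i (j + 1)) : Nat → Int × Int)))
        ++ [((fun i => ((i : Int), pvPo a i (j + 1)) : Nat → Int × Int)) j]
      = (((List.range j).filter (fun i => pvOkb a K i (j - 1))) ++ [j]).map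
          ((fun i => ((i : Int), pvPo a i (j + 1)) : Nat → Int × Int)) := by
    rw [List.map_append]
    rfl
  rw [hsing, List.filter_map]
  unfold pvAliveL
  have harg : j + 1 - 1 = j := by omega
  rw [harg]
  congr 1
  have hcomp : ((fun p => decide (p.2 ≤ K)) ∘ ((fun i => ((i : Int), pvPo a i (j + 1)) : Nat → Int × Int)))
      = fun i => decide (pvPo a i (j + 1) ≤ K) := rfl
  rw [hcomp, List.filter_append, List.range_succ, List.filter_append, List.filter_filter]
  congr 1
  · apply List.filter_congr
    intro i hi
    have hij : i < j := List.mem_range.mp hi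
    rw [Bool.and_comm]
    exact pvOkb_step a K i j hij
  · simp [List.filter_singleton, pvOkb_self a K j]

theorem pvStepB_spec (a : List Int) (K : Int) (j : Nat) (hj : j < a.length) (b : Nat) :
    pvStepB K ((b : Int), pvAliveL a K j) ((j : Int), a[j])
      = (((max b (pvCol a K j) : Nat) : Int), pvAliveL a K (j + 1)) := by
  rcases hcase : pvAliveL a K (j + 1) with _ | ⟨⟨s, v⟩, t⟩
  · have hfilt : (List.range (j + 1)).filter (fun i => pvOkb a K i j) = [] := by
      have := hcase
      unfold pvAliveL at this
      rw [List.map_eq_nil_iff] at this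
      simpa using this
    have hcol : pvCol a K j = 0 := by
      apply Nat.le_antisymm _ (Nat.zero_le _)
      apply Finset.sup_le
      intro i _
      have : pvG a K (i, j) = 0 := by
        unfold pvG
        rw [if_neg]
        rintro ⟨h1, h2⟩
        have hmem : i ∈ (List.range (j + 1)).filter (fun i => pvOkb a K i j) :=
          List.mem_filter.mpr ⟨List.mem_range.mpr (by omega), h2⟩
        rw [hfilt] at hmem
        exact (List.not_mem_nil).elim hmem
      omega
    unfold pvStepB
    simp only [pvAlive_step a K j hj, hcase, hcol]
    simp
  · have hmap := hcase
    unfold pvAliveL at hmap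
    rw [Nat.add_sub_cancel, List.map_eq_cons_iff] at hmap
    obtain ⟨s₀, l₀, hl, hf, -⟩ := hmap
    have hs : s = (s₀ : Int) := by
      have := congrArg Prod.fst hf
      simpa using this.symm
    have hmem : s₀ ∈ (List.range (j + 1)).filter (fun i => pvOkb a K i j) := by
      rw [hl]; exact List.mem_cons_self
    have hok₀ : pvOkb a K s₀ j = true := by simpa using (List.mem_filter.mp hmem).2
    have hle₀ : s₀ ≤ j := by
      have := List.mem_range.mp (List.mem_filter.mp hmem).1
      omega
    have hmin : ∀ i, i ≤ j → pvOkb a K i j = true → s₀ ≤ i := by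
      intro i hi hok
      have hmemi : i ∈ (List.range (j + 1)).filter (fun i => pvOkb a K i j) :=
        List.mem_filter.mpr ⟨List.mem_range.mpr (by omega), hok⟩
      rw [hl] at hmemi
      have hpw : ((List.range (j + 1)).filter (fun i => pvOkb a K i j)).Pairwise (· < ·) :=
        List.Pairwise.sublist List.filter_sublist List.pairwise_lt_range
      rw [hl, List.pairwise_cons] at hpw
      rcases List.mem_cons.mp hmemi with h | h
      · omega
      · exact Nat.le_of_lt (hpw.1 i h)
    have hcol : pvCol a K j = j - s₀ + 1 := by
      apply Nat.le_antisymm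
      · apply Finset.sup_le
        intro i _
        unfold pvG
        split_ifs with hcond
        · have := hmin i hcond.1 hcond.2
          omega
        · omega
      · have hmemN : s₀ ∈ Finset.range a.length := Finset.mem_range.mpr (by omega)
        have := Finset.le_sup (f := fun i => pvG a K (i, j)) hmemN
        have hg : pvG a K (s₀, j) = j - s₀ + 1 := by simp [pvG, hle₀, hok₀]
        simpa [pvCol, hg] using this
    unfold pvStepB
    simp only [pvAlive_step a K j hj, hcase, hcol, hs]
    rw [Prod.mk.injEq]
    refine ⟨?_, ?_⟩
    · rw [Nat.cast_max]
      congr 1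
      push_cast [Nat.sub_add_cancel hle₀]
      omega
    · rfl

theorem pvB_fold (a : List Int) (K : Int) :
    ∀ j, j ≤ a.length →
      ((PySem.List.enumerate a 0).take j).foldl (pvStepB K) (0, [])
        = ((((Finset.range j).sup (pvCol a K) : Nat) : Int), pvAliveL a K j) := by
  intro j
  induction j with
  | zero => intro _; simp [pvAliveL]
  | succ j ih =>
    intro hj1
    have hj : j < a.length := by omega
    have htake : (PySem.List.enumerate a 0).take (j + 1)
        = (PySem.List.enumerate a 0).take j ++ [((j : Int), a[j])] := by
      rw [List.take_add_one]
      congr 1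
      rw [PySem.List.getElem?_enumerate, List.getElem?_eq_getElem hj]
      simp
    rw [htake, List.foldl_append, ih (by omega)]
    simp only [List.foldl_cons, List.foldl_nil]
    rw [pvStepB_spec a K j hj]
    rw [Prod.mk.injEq]
    refine ⟨?_, rfl⟩
    congr 1
    rw [Finset.range_add_one, Finset.sup_insert]
    exact max_comm _ _

theorem pvB_eq_T (a : List Int) (K : Int) : bit016_solution_alt a K = (pvT a K : Int) := by
  unfold bit016_solution_alt
  have hlen : (PySem.List.enumerate a 0).length = a.length := by
    simp [PySem.List.length_enumerate]
  rw [← List.take_of_length_le (le_of_eq hlen), pvB_fold a K a.length (le_refl _)]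
  unfold pvT pvCol
  rw [Finset.sup_product_right]

-- ===== VERDICT (by name: the statement is the Claim_ definition above) =====
theorem bit016_solution_spec : Claim_equal_bit016_solution := by
  intro a K _
  unfold Spec_bit016_solution
  rw [pvA_eq_T, pvB_eq_T]
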